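-- pv_equiv track=rewrite | github.com/defarloa1-alt/graph1 | scripts/backbone/geographic/build_pleiades_geonames_crosswalk.py | _build_place_summary
-- ===== SOURCE A (Python) =====
-- from typing import Dict, List
--
-- def _build_place_summary(rows: List[dict]) -> List[dict]:
--     by_pid: Dict[str, dict] = {}
--     for r in rows:
--         pid = r["pleiades_id"]
--         d = by_pid.setdefault(
--             pid,
--             {
--                 "pleiades_id": pid,
--                 "place_label": r.get("place_label", ""),
--                 "place_type": r.get("place_type", ""),
--                 "min_date": r.get("min_date", ""),
--                 "max_date": r.get("max_date", ""),
--                 "geonames_count": 0,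
--                 "match_types": set(),
--                 "geonames_feature_codes": set(),
--             },
--         )
--         d["geonames_count"] += 1
--         if r.get("match_type"):
--             d["match_types"].add(r["match_type"])
--         if r.get("geonames_feature_code"):
--             d["geonames_feature_codes"].add(r["geonames_feature_code"])
--
--     out: List[dict] = []
--     for d in by_pid.values():
--         out.append(
--             {
--                 "pleiades_id": d["pleiades_id"],
--                 "place_label": d["place_label"],
--                 "place_type": d["place_type"],
--                 "min_date": d["min_date"],
--                 "max_date": d["max_date"],
--                 "geonames_count": str(d["geonames_count"]),
--                 "match_types": "|".join(sorted(d["match_types"])),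
--                 "geonames_feature_codes": "|".join(sorted(d["geonames_feature_codes"])),
--             }
--         )
--     out.sort(key=lambda r: (-int(r["geonames_count"]), r["pleiades_id"]))
--     return out
-- ===== SOURCE B (Python) =====
-- def _build_place_summary(rows):
--     pids = list(dict.fromkeys(r["pleiades_id"] for r in rows))
--     groups = [(pid, [r for r in rows if r["pleiades_id"] == pid]) for pid in pids]
--     out = [
--         {
--             "pleiades_id": pid,
--             "place_label": g[0].get("place_label", ""),
--             "place_type": g[0].get("place_type", ""),
--             "min_date": g[0].get("min_date", ""),
--             "max_date": g[0].get("max_date", ""),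
--             "geonames_count": str(len(g)),
--             "match_types": "|".join(sorted({r["match_type"] for r in g if r.get("match_type")})),
--             "geonames_feature_codes": "|".join(sorted({r["geonames_feature_code"] for r in g if r.get("geonames_feature_code")})),
--         }
--         for pid, g in groups
--     ]
--     out.sort(key=lambda r: (-int(r["geonames_count"]), r["pleiades_id"]))
--     return out
-- ===== Notes on version B (the rewrite author's own statement) =====
-- stated objective: alternative
-- what changed: Replaces A's single-pass mutable dict of partially-built summary records (setdefault + in-place count/set mutation) with a dict-free group-by decomposition: dedup the pleiades_ids in first-seen order, materialise each group by a filter comprehension, and compute every output field directly from the finished group (first row's labels, len for the count, set comprehensions for the joined sets); the final sort line is the same.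
import Mathlib
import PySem

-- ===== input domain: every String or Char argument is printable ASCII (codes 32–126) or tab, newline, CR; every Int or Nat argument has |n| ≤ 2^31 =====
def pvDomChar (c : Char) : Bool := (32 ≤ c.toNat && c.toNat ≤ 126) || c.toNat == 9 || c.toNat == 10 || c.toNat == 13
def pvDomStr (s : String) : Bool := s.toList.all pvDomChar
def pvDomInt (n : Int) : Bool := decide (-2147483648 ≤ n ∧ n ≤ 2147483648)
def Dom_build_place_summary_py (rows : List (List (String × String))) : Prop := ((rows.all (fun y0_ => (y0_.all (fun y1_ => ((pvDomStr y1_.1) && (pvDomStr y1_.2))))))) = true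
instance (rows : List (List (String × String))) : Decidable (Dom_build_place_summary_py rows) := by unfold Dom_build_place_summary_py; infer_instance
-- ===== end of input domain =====

-- B replaces A's one-pass mutable dict of partial summaries by a dict-free group-by
-- (dedup ids, filter each group, compute fields from the finished group); return-value
-- equivalence only (neither version mutates its argument).

-- ===== PORT A =====

-- r.get(k, "") / r[k] on a row dict given as an association list: first-match lookup.
def pvRget (r : List (String × String)) (k : String) : String :=
  ((r.find? (fun p => p.1 == k)).map (·.2)).getD ""

def pvPid (r : List (String × String)) : String := pvRget r "pleiades_id"

-- the per-pid record A keeps in by_pid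
structure PvSt where
  pid : String
  label : String
  ptype : String
  minD : String
  maxD : String
  count : Int
  mts : List String   -- PySem.Set
  fcs : List String   -- PySem.Set
deriving Repr, DecidableEq

-- one iteration of A's first loop: setdefault, then mutate count and the two sets
-- (net effect on the dict: insert the updated record at the key's position).
def pvStepA (d : PySem.Dict String PvSt) (r : List (String × String)) : PySem.Dict String PvSt :=
  let pid := pvPid r
  let d0 : PvSt :=
    match d.get? pid with
    | some s => s
    | none => ⟨pid, pvRget r "place_label", pvRget r "place_type",
               pvRget r "min_date", pvRget r "max_date", 0, PySem.Set.empty, PySem.Set.empty⟩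
  let mt := pvRget r "match_type"
  let fc := pvRget r "geonames_feature_code"
  let s1 : PvSt :=
    { d0 with count := d0.count + 1,
              mts := if mt == "" then d0.mts else PySem.Set.add d0.mts mt,
              fcs := if fc == "" then d0.fcs else PySem.Set.add d0.fcs fc }
  d.insert pid s1

-- A's second loop body: format one record as an output row
def pvFmtA (s : PvSt) : List (String × String) :=
  [("pleiades_id", s.pid), ("place_label", s.label), ("place_type", s.ptype),
   ("min_date", s.minD), ("max_date", s.maxD),
   ("geonames_count", PySem.Int.toStr s.count),
   ("match_types", PySem.Str.join "|" (PySem.List.sorted s.mts (fun x => x) false)),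
   ("geonames_feature_codes", PySem.Str.join "|" (PySem.List.sorted s.fcs (fun x => x) false))]

-- int(r["geonames_count"]) cannot fail on the rows A sorts (always str(count)); getD 0 is unreachable.
def pvSortKey1 (r : List (String × String)) : Int :=
  -((PySem.Int.ofStr? (pvRget r "geonames_count")).getD 0)

def build_place_summary_py (rows : List (List (String × String))) : List (List (String × String)) :=
  let by_pid := rows.foldl pvStepA PySem.Dict.empty
  let out := by_pid.values.map pvFmtA
  PySem.List.sorted2 out pvSortKey1 (fun r => pvRget r "pleiades_id") false

-- ===== PORT B =====

-- [r[k] for r in g if r.get(k)] (the list the set comprehension runs over)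
def pvVals (g : List (List (String × String))) (k : String) : List String :=
  (g.map (fun r => pvRget r k)).filter (fun s => !(s == ""))

-- B's comprehension body: format one (pid, group) pair
def pvFmtB (p : String) (g : List (List (String × String))) : List (String × String) :=
  [("pleiades_id", p),
   ("place_label", pvRget (g.headD []) "place_label"),
   ("place_type", pvRget (g.headD []) "place_type"),
   ("min_date", pvRget (g.headD []) "min_date"),
   ("max_date", pvRget (g.headD []) "max_date"),
   ("geonames_count", PySem.Int.toStr (g.length : Int)),
   ("match_types", PySem.Str.join "|" (PySem.List.sorted (PySem.Set.ofList (pvVals g "match_type")) (fun x => x) false)),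
   ("geonames_feature_codes", PySem.Str.join "|" (PySem.List.sorted (PySem.Set.ofList (pvVals g "geonames_feature_code")) (fun x => x) false))]

def build_place_summary_py_alt (rows : List (List (String × String))) : List (List (String × String)) :=
  let pids := PySem.List.dedup (rows.map pvPid)
  let groups := pids.map (fun p => (p, rows.filter (fun r => pvPid r == p)))
  let out := groups.map (fun x => pvFmtB x.1 x.2)
  PySem.List.sorted2 out pvSortKey1 (fun r => pvRget r "pleiades_id") false

-- ===== PRECONDITION & SPEC =====

-- Pre_ excludes exactly the rows without a "pleiades_id" key, on which Python A raises KeyError.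
def Pre_build_place_summary_py (rows : List (List (String × String))) : Prop :=
  ∀ r ∈ rows, "pleiades_id" ∈ r.map Prod.fst

instance (rows : List (List (String × String))) : Decidable (Pre_build_place_summary_py rows) := by
  unfold Pre_build_place_summary_py; infer_instance

def pvWitness_build_place_summary_py : (List (List (String × String))) :=
  [[("pleiades_id", "1"), ("match_type", "exact")], [("pleiades_id", "2")]]

def Spec_build_place_summary_py (rows : List (List (String × String))) (out : List (List (String × String))) : Prop := out = build_place_summary_py_alt rows
instance (rows : List (List (String × String))) (out : List (List (String × String))) : Decidable (Spec_build_place_summary_py rows out) := by unfold Spec_build_place_summary_py; infer_instance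

-- ===== CLAIM (what is proved, stated in full; the proofs are below) =====
def Claim_equal_build_place_summary_py : Prop := ∀ (rows : List (List (String × String))), Dom_build_place_summary_py rows → Pre_build_place_summary_py rows → Spec_build_place_summary_py rows (build_place_summary_py rows)

-- ===== LEMMAS AND PROOFS =====

-- the record A's dict holds at key p after processing rows whose group (in order) is g
def pvAgg (p : String) (g : List (List (String × String))) : PvSt :=
  ⟨p, pvRget (g.headD []) "place_label", pvRget (g.headD []) "place_type",
   pvRget (g.headD []) "min_date", pvRget (g.headD []) "max_date",
   (g.length : Int),
   PySem.Set.ofList (pvVals g "match_type"),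
   PySem.Set.ofList (pvVals g "geonames_feature_code")⟩

theorem pvFind_beq_self (l : List String) (p : String) (h : p ∈ l) :
    l.find? (fun q => q == p) = some p := by
  induction l with
  | nil => cases h
  | cons a t ih =>
    by_cases hap : a = p
    · subst hap; simp [List.find?]
    · simp only [List.mem_cons] at h
      have hp : p ∈ t := h.resolve_left (fun he => hap he.symm)
      have : (a == p) = false := by simp [hap]
      simp [List.find?, this, ih hp]

theorem pvVals_append (g h : List (List (String × String))) (k : String) :
    pvVals (g ++ h) k = pvVals g k ++ pvVals h k := by
  simp [pvVals]

theorem pvOfList_snoc {v : String} {xs : List String} :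
    PySem.Set.ofList (xs ++ [v]) = PySem.Set.add (PySem.Set.ofList xs) v := by
  simp [PySem.Set.ofList, List.foldl_append]

theorem pvSet_snoc (g : List (List (String × String))) (r : List (String × String)) (k : String) :
    PySem.Set.ofList (pvVals (g ++ [r]) k)
      = (if pvRget r k == "" then PySem.Set.ofList (pvVals g k)
         else PySem.Set.add (PySem.Set.ofList (pvVals g k)) (pvRget r k)) := by
  rw [pvVals_append]
  by_cases hv : pvRget r k == ""
  · have : pvVals [r] k = [] := by simp [pvVals, hv]
    simp [this, hv]
  · have : pvVals [r] k = [pvRget r k] := by simp [pvVals, hv]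
    simp [this, hv, pvOfList_snoc]

theorem pvAdd_of_mem {s : List String} {x : String} (h : x ∈ s) :
    PySem.Set.add s x = s := by
  simp [PySem.Set.add, PySem.Set.contains, h]

theorem pvAdd_of_not_mem {s : List String} {x : String} (h : x ∉ s) :
    PySem.Set.add s x = s ++ [x] := by
  simp [PySem.Set.add, PySem.Set.contains, h]

theorem pvAgg_snoc (p : String) (g : List (List (String × String)))
    (r : List (String × String)) (hg : g ≠ []) :
    pvAgg p (g ++ [r]) =
      { pvAgg p g with
        count := (pvAgg p g).count + 1,
        mts := if pvRget r "match_type" == "" then (pvAgg p g).mts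
               else PySem.Set.add (pvAgg p g).mts (pvRget r "match_type"),
        fcs := if pvRget r "geonames_feature_code" == "" then (pvAgg p g).fcs
               else PySem.Set.add (pvAgg p g).fcs (pvRget r "geonames_feature_code") } := by
  obtain ⟨a, t, rfl⟩ : ∃ a t, g = a :: t := by
    cases g with
    | nil => exact absurd rfl hg
    | cons a t => exact ⟨a, t, rfl⟩
  simp only [pvAgg, pvSet_snoc]
  simp [List.length_append]

theorem pvAgg_single (r : List (String × String)) (p : String) :
    pvAgg p [r] =
      ⟨p, pvRget r "place_label", pvRget r "place_type", pvRget r "min_date", pvRget r "max_date",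
       1,
       (if pvRget r "match_type" == "" then PySem.Set.empty
        else PySem.Set.add PySem.Set.empty (pvRget r "match_type")),
       (if pvRget r "geonames_feature_code" == "" then PySem.Set.empty
        else PySem.Set.add PySem.Set.empty (pvRget r "geonames_feature_code"))⟩ := by
  have h1 : pvAgg p [r] = pvAgg p ([] ++ [r]) := rfl
  rw [h1]
  simp only [pvAgg, pvSet_snoc]
  rfl

theorem pvItemsA (rows : List (List (String × String))) :
    (rows.foldl pvStepA PySem.Dict.empty).items
      = (PySem.Set.ofList (rows.map pvPid)).map
          (fun p => (p, pvAgg p (rows.filter (fun r => pvPid r == p)))) := by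
  induction rows using List.reverseRecOn with
  | nil => rfl
  | append_singleton rs r ih =>
    rw [List.foldl_append, List.foldl_cons, List.foldl_nil]
    have hmapsnoc : (rs ++ [r]).map pvPid = rs.map pvPid ++ [pvPid r] := by simp
    by_cases hmem : pvPid r ∈ PySem.Set.ofList (rs.map pvPid)
    · -- existing key: insert overwrites in place
      have hcont : (rs.foldl pvStepA PySem.Dict.empty).contains (pvPid r) = true := by
        simp only [PySem.Dict.contains, ih, List.any_map, List.any_eq_true]
        exact ⟨pvPid r, hmem, by simp⟩
      have hget : (rs.foldl pvStepA PySem.Dict.empty).get? (pvPid r)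
          = some (pvAgg (pvPid r) (rs.filter (fun x => pvPid x == pvPid r))) := by
        simp only [PySem.Dict.get?, ih, List.find?_map]
        have h2 : (List.find? ((fun x => x.1 == pvPid r) ∘
            (fun p => (p, pvAgg p (rs.filter (fun x => pvPid x == p)))))
            (PySem.Set.ofList (rs.map pvPid)))
            = List.find? (fun q => q == pvPid r) (PySem.Set.ofList (rs.map pvPid)) := rfl
        rw [h2, pvFind_beq_self _ _ hmem]
        rfl
      have hpids : PySem.Set.ofList ((rs ++ [r]).map pvPid) = PySem.Set.ofList (rs.map pvPid) := by
        rw [hmapsnoc, pvOfList_snoc, pvAdd_of_mem hmem]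
      have hgne : rs.filter (fun x => pvPid x == pvPid r) ≠ [] := by
        rw [PySem.Set.mem_ofList] at hmem
        obtain ⟨x, hx, hpx⟩ := List.mem_map.mp hmem
        have hxm : x ∈ rs.filter (fun y => pvPid y == pvPid r) :=
          List.mem_filter.mpr ⟨hx, by simp [hpx]⟩
        exact List.ne_nil_of_mem hxm
      rw [hpids]
      simp only [pvStepA, hget, PySem.Dict.insert, hcont, if_pos, ih, List.map_map]
      apply List.map_congr_left
      intro q hq
      by_cases hqp : q = pvPid r
      · subst hqp
        have hfilter : (rs ++ [r]).filter (fun x => pvPid x == pvPid r)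
            = rs.filter (fun x => pvPid x == pvPid r) ++ [r] := by
          rw [List.filter_append]; simp
        simp only [Function.comp_apply, beq_self_eq_true, if_true]
        rw [hfilter, pvAgg_snoc _ _ _ hgne]
      · have hbeq : (q == pvPid r) = false := by simp [hqp]
        have hfilter : (rs ++ [r]).filter (fun x => pvPid x == q)
            = rs.filter (fun x => pvPid x == q) := by
          rw [List.filter_append]
          simp [show (pvPid r == q) = false by simp [Ne.symm hqp]]
        simp only [Function.comp_apply, hbeq, Bool.false_eq_true, if_false]
        rw [hfilter]
    · -- new key: insert appends
      have hnotmap : pvPid r ∉ rs.map pvPid := fun hx =>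
        hmem ((PySem.Set.mem_ofList _ _).mpr hx)
      have hcont : (rs.foldl pvStepA PySem.Dict.empty).contains (pvPid r) = false := by
        simp only [PySem.Dict.contains, ih, List.any_map, List.any_eq_false]
        intro q hq
        have hne : q ≠ pvPid r := fun he => hmem (he ▸ hq)
        simp [hne]
      have hget : (rs.foldl pvStepA PySem.Dict.empty).get? (pvPid r) = none := by
        simp only [PySem.Dict.get?, ih, List.find?_map]
        have h2 : List.find? ((fun x => x.1 == pvPid r) ∘
            (fun p => (p, pvAgg p (rs.filter (fun x => pvPid x == p)))))
            (PySem.Set.ofList (rs.map pvPid)) = none := by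
          apply List.find?_eq_none.mpr
          intro q hq
          have hne : q ≠ pvPid r := fun he => hmem (he ▸ hq)
          simp [hne]
        rw [h2]; rfl
      have hpids : PySem.Set.ofList ((rs ++ [r]).map pvPid)
          = PySem.Set.ofList (rs.map pvPid) ++ [pvPid r] := by
        rw [hmapsnoc, pvOfList_snoc, pvAdd_of_not_mem hmem]
      rw [hpids]
      simp only [pvStepA, hget, PySem.Dict.insert, hcont, Bool.false_eq_true, if_neg,
        not_false_eq_true, ih, List.map_append, List.map_cons, List.map_nil]
      congr 1
      · apply List.map_congr_left
        intro q hq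
        have hqp : q ≠ pvPid r := fun he => hmem (he ▸ hq)
        have hfilter : (rs ++ [r]).filter (fun x => pvPid x == q)
            = rs.filter (fun x => pvPid x == q) := by
          rw [List.filter_append]
          simp [show (pvPid r == q) = false by simp [Ne.symm hqp]]
        rw [hfilter]
      · have hnil : rs.filter (fun x => pvPid x == pvPid r) = [] := by
          apply List.filter_eq_nil_iff.mpr
          intro x hx
          have hne : pvPid x ≠ pvPid r := fun he =>
            hnotmap (List.mem_map.mpr ⟨x, hx, he⟩)
          simp [hne]
        have hfilter : (rs ++ [r]).filter (fun x => pvPid x == pvPid r) = [r] := by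
          rw [List.filter_append, hnil]; simp
        rw [hfilter, pvAgg_single]
        rfl

-- ===== VERDICT (by name: the statement is the Claim_ definition above) =====
theorem build_place_summary_py_spec : Claim_equal_build_place_summary_py := by
  intro rows _ _
  show build_place_summary_py rows = build_place_summary_py_alt rows
  unfold build_place_summary_py build_place_summary_py_alt
  simp only [PySem.Dict.values, pvItemsA, List.map_map, PySem.List.dedup]
  congr 1
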